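-- pv_equiv track=rewrite | github.com/RahulKrishna-A/DSA-Leetcode | GeeksForGeeks/Aggressive Cows.py | solve
-- ===== SOURCE A (Python) =====
-- def solve(n, k, stalls):
--
--     def canPlace(dist):
--         totcow = 1
--         last = stalls[0]
--         for i in range(1, len(stalls)):
--             if stalls[i] - last >= dist:
--                 totcow += 1
--                 last = stalls[i]
--             if totcow >= k:
--                 return True
--         return False
--
--     stalls.sort()
--     s = 0
--     e = stalls[n - 1] - stalls[0]
--     ans = 0
--
--     while s <= e:
--         mid = s + (e - s) // 2
--
--         if canPlace(mid):
--             ans = mid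
--             s = mid + 1
--         else:
--             e = mid - 1
--     return ans
-- ===== SOURCE B (Python) =====
-- def solve(n, k, stalls):
--
--     def canPlace(dist):
--         totcow = 1
--         last = stalls[0]
--         for i in range(1, len(stalls)):
--             if stalls[i] - last >= dist:
--                 totcow += 1
--                 last = stalls[i]
--             if totcow >= k:
--                 return True
--         return False
--
--     stalls.sort()
--     # candidate-set scan: any achievable minimum distance is a gap between two
--     # stall positions, so only the realizable pairwise differences (capped by
--     # the search range stalls[n-1]-stalls[0] that the task uses) need testing;
--     # keep the largest feasible one
--     e = stalls[n - 1] - stalls[0]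
--     best = 0
--     for d in {y - x for x in stalls for y in stalls if y > x}:
--         if d <= e and best < d and canPlace(d):
--             best = d
--     return best
-- ===== Notes on version B (the rewrite author's own statement) =====
-- stated objective: alternative
-- what changed: The binary search over the integer interval [s,e] (two shrinking endpoints, midpoint probes) is replaced by a candidate-set scan: any achievable minimum distance is a pairwise difference of stall positions, so B builds the set of positive pairwise gaps and keeps the largest one that is within the search range stalls[n-1]-stalls[0] and passes canPlace; the in-place sort and canPlace are kept.
import Mathlib
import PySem

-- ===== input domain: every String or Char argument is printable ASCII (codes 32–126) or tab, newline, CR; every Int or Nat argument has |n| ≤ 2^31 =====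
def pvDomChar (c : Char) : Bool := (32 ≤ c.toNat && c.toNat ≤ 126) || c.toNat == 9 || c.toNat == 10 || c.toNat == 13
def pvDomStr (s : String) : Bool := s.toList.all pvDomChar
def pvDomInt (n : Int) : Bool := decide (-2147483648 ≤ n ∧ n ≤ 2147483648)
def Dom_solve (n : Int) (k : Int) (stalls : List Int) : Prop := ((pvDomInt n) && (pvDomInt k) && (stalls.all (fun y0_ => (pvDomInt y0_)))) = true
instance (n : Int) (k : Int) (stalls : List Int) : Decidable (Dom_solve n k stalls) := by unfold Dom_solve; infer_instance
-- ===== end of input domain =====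

-- B replaces A's binary search over [s,e] by a candidate-set scan: every achievable
-- minimum distance is a pairwise stall gap, so B tests only the set of positive pairwise
-- differences (capped by e) and keeps the largest feasible one; A sorts `stalls` in
-- place — the claim is about the return value (B sorts in place too).

-- ===== PORT A =====

-- canPlace(dist): shared verbatim by A and B (B keeps A's helper unchanged).
-- Early return is modelled by the `if k ≤ totcow'` branch; stalls[i] with i drawn from
-- range(1, len) is always in range, so pyGetD is exact there.
def canPlaceGo (st : List Int) (k dist : Int) : List Int → Int → Int → Bool
  | [], _, _ => false
  | i :: rest, totcow, last =>
    let si := PySem.List.pyGetD st i 0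
    let totcow' := if dist ≤ si - last then totcow + 1 else totcow
    let last' := if dist ≤ si - last then si else last
    if k ≤ totcow' then true else canPlaceGo st k dist rest totcow' last'

-- stalls[0] raises IndexError on an empty list; that input is outside Pre_solve,
-- so the pyGetD default is never observed under the claim.
def canPlace (st : List Int) (k dist : Int) : Bool :=
  canPlaceGo st k dist (PySem.List.pyRange 1 (st.length : Int) 1) 1 (PySem.List.pyGetD st 0 0)

-- the `while s <= e` binary-search loop of A; `fuel` is only a structural totality
-- guard (the call site passes (e+1-s).toNat, which never runs out: each iteration
-- shrinks e+1-s, see bsLoop_eq_mxAux below), the loop body is A's verbatim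
def bsLoop (st : List Int) (k : Int) : Nat → Int → Int → Int → Int
  | 0, _, _, ans => ans
  | fuel + 1, s, e, ans =>
    if s ≤ e then
      let mid := s + PySem.Int.floordiv (e - s) 2
      if canPlace st k mid then bsLoop st k fuel (mid + 1) e mid
      else bsLoop st k fuel s (mid - 1) ans
    else ans

def solve (n : Int) (k : Int) (stalls : List Int) : Int :=
  let st := PySem.List.sorted stalls (fun x => x) false
  match PySem.List.pyGet? st (n - 1), PySem.List.pyGet? st 0 with
  | some a, some b => bsLoop st k ((a - b) + 1).toNat 0 (a - b) 0
  | _, _ => 0   -- stalls[n-1] / stalls[0] raises: outside Pre_solve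

-- ===== PORT B =====

-- `{y - x for x in stalls for y in stalls if y > x}` — the set of positive pairwise gaps
def candsOf (st : List Int) : List Int :=
  PySem.Set.ofList (st.flatMap (fun x => (st.filter (fun y => x < y)).map (fun y => y - x)))

def solve_alt (n : Int) (k : Int) (stalls : List Int) : Int :=
  let st := PySem.List.sorted stalls (fun x => x) false
  match PySem.List.pyGet? st (n - 1) with
  | none => 0   -- stalls[n-1] raises: outside Pre_solve
  | some a =>
    match PySem.List.pyGet? st 0 with
    | none => 0   -- stalls[0] raises: outside Pre_solve
    | some b =>
      let e := a - b
      -- `for d in …: if d <= e and best < d and canPlace(d): best = d` (the running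
      -- maximum makes the result independent of the set's iteration order)
      (candsOf st).foldl
        (fun best d => if d ≤ e ∧ best < d ∧ canPlace st k d = true then d else best) 0

-- ===== PRECONDITION & SPEC =====

-- Pre_ excludes exactly the inputs where Python A raises IndexError:
-- empty stalls (stalls[0]) and n with n-1 outside Python's index range.
def Pre_solve (n : Int) (k : Int) (stalls : List Int) : Prop :=
  stalls ≠ [] ∧ PySem.Raise.InRange stalls.length (n - 1)
instance (n : Int) (k : Int) (stalls : List Int) : Decidable (Pre_solve n k stalls) := by
  unfold Pre_solve; infer_instance

def pvWitness_solve : Int × Int × List Int := (2, 2, [1, 5])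

def Spec_solve (n : Int) (k : Int) (stalls : List Int) (out : Int) : Prop := out = solve_alt n k stalls
instance (n : Int) (k : Int) (stalls : List Int) (out : Int) : Decidable (Spec_solve n k stalls out) := by unfold Spec_solve; infer_instance

-- ===== CLAIM (what is proved, stated in full; the proofs are below) =====
def Claim_equal_solve : Prop := ∀ (n : Int) (k : Int) (stalls : List Int), Dom_solve n k stalls → Pre_solve n k stalls → Spec_solve n k stalls (solve n k stalls)

-- ===== LEMMAS AND PROOFS =====

-- the greedy cow-count fold over the stall VALUES (tail of the sorted list)
def greedy (d : Int) (xs : List Int) (t l : Int) : Int × Int :=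
  xs.foldl (fun p x => if d ≤ x - p.2 then (p.1 + 1, x) else p) (t, l)

def MonoP (P : Int → Bool) : Prop := ∀ d d' : Int, d' ≤ d → P d = true → P d' = true

-- largest x in [1, m] with P x, else 0
def mxAux (P : Int → Bool) : Nat → Int
  | 0 => 0
  | m + 1 => if P ((m : Int) + 1) then (m : Int) + 1 else mxAux P m

theorem mxAux_self (P : Int → Bool) (d : Int) (h0 : 0 ≤ d) (hd : P d = true) :
    mxAux P d.toNat = d := by
  rcases eq_or_lt_of_le h0 with h | h
  · simp [← h, mxAux]
  · have hdn : d.toNat = (d - 1).toNat + 1 := by omega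
    rw [hdn]
    simp only [mxAux]
    have hc : ((d - 1).toNat : Int) + 1 = d := by omega
    rw [hc]
    simp [hd]

theorem mxAux_ext (P : Int → Bool) (a b : Int) (ha : -1 ≤ a) (hab : a ≤ b)
    (hno : ∀ d, a < d → d ≤ b → P d = false) : mxAux P b.toNat = mxAux P a.toNat := by
  have H : ∀ N : Nat, ∀ b : Int, a ≤ b → (b - a).toNat ≤ N →
      (∀ d, a < d → d ≤ b → P d = false) → mxAux P b.toNat = mxAux P a.toNat := by
    intro N
    induction N with
    | zero =>
      intro b h1 h2 _
      have hba : b = a := by omega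
      rw [hba]
    | succ N ih =>
      intro b h1 h2 hno
      rcases eq_or_lt_of_le h1 with h | h
      · rw [h]
      · by_cases hb : b ≤ 0
        · have h1' : b.toNat = 0 := by omega
          have h2' : a.toNat = 0 := by omega
          rw [h1', h2']
        · have hbn : b.toNat = (b - 1).toNat + 1 := by omega
          rw [hbn]
          simp only [mxAux]
          have hcast : ((b - 1).toNat : Int) + 1 = b := by omega
          rw [hcast, hno b h (le_refl b)]
          simp only [Bool.false_eq_true, if_false]
          exact ih (b - 1) (by omega) (by omega) (fun d hd1 hd2 => hno d hd1 (by omega))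
  exact H (b - a).toNat b hab (le_refl _) hno

-- count component of the greedy fold never decreases
theorem greedy_count_le (d : Int) : ∀ (xs : List Int) (t l : Int), t ≤ (greedy d xs t l).1 := by
  intro xs
  induction xs with
  | nil => intro t l; simp [greedy]
  | cons x rest ih =>
    intro t l
    simp only [greedy, List.foldl_cons]
    split
    · exact le_trans (by omega) (ih (t + 1) x)
    · exact ih t l

-- a smaller distance never places fewer cows (on a sorted suffix)
theorem greedy_mono (d d' : Int) (hd : d' ≤ d) :
    ∀ (xs : List Int) (t l t2 l2 : Int), xs.Pairwise (· ≤ ·) → (∀ x ∈ xs, l2 ≤ x) →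
      (t < t2 ∨ (t = t2 ∧ l2 ≤ l)) → (greedy d xs t l).1 ≤ (greedy d' xs t2 l2).1 := by
  intro xs
  induction xs with
  | nil => intro t l t2 l2 _ _ hR; simp [greedy]; omega
  | cons x rest ih =>
    intro t l t2 l2 hp hx hR
    have hpw := (List.pairwise_cons.mp hp).1
    have hp' := (List.pairwise_cons.mp hp).2
    have hx2 : l2 ≤ x := hx x (by simp)
    have hx' : ∀ y ∈ rest, l2 ≤ y := fun y hy => hx y (by simp [hy])
    simp only [greedy, List.foldl_cons] at *
    rcases hR with hlt | ⟨heq, hle⟩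
    · by_cases h1 : d ≤ x - l <;> by_cases h2 : d' ≤ x - l2 <;>
        simp only [h1, h2, if_false, if_pos] <;> first
        | exact ih (t + 1) x (t2 + 1) x hp' (fun y hy => hpw y hy) (by omega)
        | exact ih (t + 1) x t2 l2 hp' hx' (by omega)
        | exact ih t l (t2 + 1) x hp' (fun y hy => hpw y hy) (by omega)
        | exact ih t l t2 l2 hp' hx' (by omega)
    · by_cases h1 : d ≤ x - l
      · have h2 : d' ≤ x - l2 := by omega
        simp only [h1, h2, if_true]
        exact ih (t + 1) x (t2 + 1) x hp' (fun y hy => hpw y hy) (by omega)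
      · by_cases h2 : d' ≤ x - l2 <;> simp only [h1, h2, if_true, if_false] <;> first
          | exact ih t l (t2 + 1) x hp' (fun y hy => hpw y hy) (by omega)
          | exact ih t l t2 l2 hp' hx' (by omega)

-- early-exit recursion = non-empty check plus final-count test
theorem canPlaceGo_eq (st : List Int) (k d : Int) :
    ∀ (idxs : List Int) (t l : Int),
      canPlaceGo st k d idxs t l =
        (!idxs.isEmpty && decide (k ≤ (greedy d (idxs.map (fun i => PySem.List.pyGetD st i 0)) t l).1)) := by
  intro idxs
  induction idxs with
  | nil => intro t l; simp [canPlaceGo]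
  | cons i rest ih =>
    intro t l
    have hL : canPlaceGo st k d (i :: rest) t l
        = if k ≤ (if d ≤ PySem.List.pyGetD st i 0 - l then t + 1 else t) then true
          else canPlaceGo st k d rest (if d ≤ PySem.List.pyGetD st i 0 - l then t + 1 else t)
                 (if d ≤ PySem.List.pyGetD st i 0 - l then PySem.List.pyGetD st i 0 else l) := rfl
    have hgr : greedy d ((i :: rest).map (fun j => PySem.List.pyGetD st j 0)) t l
        = greedy d (rest.map (fun j => PySem.List.pyGetD st j 0))
            (if d ≤ PySem.List.pyGetD st i 0 - l then t + 1 else t)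
            (if d ≤ PySem.List.pyGetD st i 0 - l then PySem.List.pyGetD st i 0 else l) := by
      simp only [List.map_cons, greedy, List.foldl_cons]
      split <;> rfl
    rw [hL, hgr, ih]
    by_cases hk : k ≤ (if d ≤ PySem.List.pyGetD st i 0 - l then t + 1 else t)
    · rw [if_pos hk]
      have h1 := greedy_count_le d (rest.map (fun j => PySem.List.pyGetD st j 0))
        (if d ≤ PySem.List.pyGetD st i 0 - l then t + 1 else t)
        (if d ≤ PySem.List.pyGetD st i 0 - l then PySem.List.pyGetD st i 0 else l)
      have h2 : k ≤ (greedy d (rest.map (fun j => PySem.List.pyGetD st j 0))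
          (if d ≤ PySem.List.pyGetD st i 0 - l then t + 1 else t)
          (if d ≤ PySem.List.pyGetD st i 0 - l then PySem.List.pyGetD st i 0 else l)).1 :=
        le_trans hk h1
      simp [h2]
    · rw [if_neg hk]
      cases rest with
      | nil =>
        have hk' : ¬ k ≤ (greedy d ([] : List Int)
            (if d ≤ PySem.List.pyGetD st i 0 - l then t + 1 else t)
            (if d ≤ PySem.List.pyGetD st i 0 - l then PySem.List.pyGetD st i 0 else l)).1 := by
          simpa [greedy] using hk
        simp [hk']
      | cons j rs => simp

theorem canPlace_mono (st : List Int) (k : Int) (hs : st.Pairwise (· ≤ ·)) :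
    MonoP (canPlace st k) := by
  intro d d' hdd hP
  unfold canPlace at hP ⊢
  rw [canPlaceGo_eq] at hP ⊢
  obtain ⟨hne, hcnt⟩ := Bool.and_eq_true_iff.mp hP
  refine Bool.and_eq_true_iff.mpr ⟨hne, ?_⟩
  cases st with
  | nil => simp [PySem.List.pyRange_one_eq_nil] at hne
  | cons h0 tl =>
    have hmap : (PySem.List.pyRange 1 ((h0 :: tl).length : Int) 1).map
        (fun j => PySem.List.pyGetD (h0 :: tl) j 0) = (h0 :: tl).drop 1 := by
      exact PySem.List.map_pyGetD_pyRange' (h0 :: tl) 0 (by norm_num)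
    rw [hmap] at hcnt ⊢
    have hget : PySem.List.pyGetD (h0 :: tl) 0 0 = h0 := by
      simp [PySem.List.pyGetD]
    rw [hget] at hcnt ⊢
    have hdrop : (h0 :: tl).drop 1 = tl := rfl
    rw [hdrop] at hcnt ⊢
    simp only [decide_eq_true_eq] at hcnt ⊢
    have hpair := List.pairwise_cons.mp hs
    exact le_trans hcnt (greedy_mono d d' hdd tl 1 h0 1 h0 hpair.2 hpair.1 (Or.inr ⟨rfl, le_refl _⟩))

theorem bsLoop_eq_mxAux (st : List Int) (k : Int) (hm : MonoP (canPlace st k)) :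
    ∀ (N : Nat) (s e ans : Int), (e + 1 - s).toNat ≤ N → 0 ≤ s → s ≤ e + 1 →
      ans = mxAux (canPlace st k) (s - 1).toNat →
      bsLoop st k N s e ans = mxAux (canPlace st k) e.toNat := by
  intro N
  induction N with
  | zero =>
    intro s e ans h1 h2 h3 h4
    have hse : s - 1 = e := by omega
    rw [bsLoop, h4, hse]
  | succ N ih =>
    intro s e ans h1 h2 h3 h4
    by_cases hse : s ≤ e
    · rw [bsLoop, if_pos hse]
      have hdvd : PySem.Int.floordiv (e - s) 2 = (e - s) / 2 :=
        PySem.Int.floordiv_eq_ediv_of_pos (by norm_num)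
      have hmb : s ≤ s + PySem.Int.floordiv (e - s) 2 ∧ s + PySem.Int.floordiv (e - s) 2 ≤ e := by
        rw [hdvd]; omega
      by_cases hc : canPlace st k (s + PySem.Int.floordiv (e - s) 2) = true
      · rw [if_pos hc]
        refine ih _ e _ (by rw [hdvd] at *; omega) (by omega) (by omega) ?_
        have hm1 : s + PySem.Int.floordiv (e - s) 2 + 1 - 1 = s + PySem.Int.floordiv (e - s) 2 := by
          omega
        rw [hm1, mxAux_self _ _ (by omega) hc]
      · rw [if_neg hc]
        have hrec := ih s (s + PySem.Int.floordiv (e - s) 2 - 1) ans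
          (by rw [hdvd] at *; omega) h2 (by omega) h4
        rw [hrec]
        refine (mxAux_ext (canPlace st k) (s + PySem.Int.floordiv (e - s) 2 - 1) e
          (by omega) (by omega) ?_).symm
        intro d hd1 hd2
        by_contra hdf
        exact hc (hm d (s + PySem.Int.floordiv (e - s) 2) (by omega)
          (Bool.not_eq_false _ ▸ hdf))
    · rw [bsLoop, if_neg hse]
      have hse' : s - 1 = e := by omega
      rw [h4, hse']

theorem mxAux_nonneg (P : Int → Bool) (m : Nat) : 0 ≤ mxAux P m := by
  induction m with
  | zero => simp [mxAux]
  | succ m ih => simp only [mxAux]; split <;> omega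

theorem mxAux_le (P : Int → Bool) (m : Nat) : mxAux P m ≤ (m : Int) := by
  induction m with
  | zero => simp [mxAux]
  | succ m ih => simp only [mxAux]; split <;> [omega; (push_cast; omega)]

theorem mxAux_pos_spec (P : Int → Bool) (m : Nat) (h : 0 < mxAux P m) : P (mxAux P m) = true := by
  induction m with
  | zero => simp [mxAux] at h
  | succ m ih =>
    by_cases hP : P ((m : Int) + 1) = true
    · simp [mxAux, hP]
    · simp only [mxAux, hP, Bool.false_eq_true, if_false] at h ⊢
      exact ih h

theorem le_mxAux (P : Int → Bool) (m : Nat) (d : Int) (h1 : 1 ≤ d) (h2 : d ≤ (m : Int))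
    (hd : P d = true) : d ≤ mxAux P m := by
  induction m with
  | zero => omega
  | succ m ih =>
    simp only [mxAux]
    by_cases hdm : d = (m : Int) + 1
    · subst hdm; simp [hd]
    · have := ih (by push_cast at h2 ⊢; omega)
      split <;> omega

-- B's fold: running maximum of the candidates that pass the cap and canPlace
def mf (e : Int) (P : Int → Bool) (xs : List Int) (acc : Int) : Int :=
  xs.foldl (fun best d => if d ≤ e ∧ best < d ∧ P d = true then d else best) acc

theorem mf_le_acc (e : Int) (P : Int → Bool) :
    ∀ (xs : List Int) (acc : Int), acc ≤ mf e P xs acc := by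
  intro xs
  induction xs with
  | nil => intro acc; simp [mf]
  | cons x rest ih =>
    intro acc
    simp only [mf, List.foldl_cons]
    split
    · exact le_trans (by omega) (ih x)
    · exact ih acc

theorem mf_ge_mem (e : Int) (P : Int → Bool) :
    ∀ (xs : List Int) (acc d : Int), d ∈ xs → d ≤ e → P d = true → d ≤ mf e P xs acc := by
  intro xs
  induction xs with
  | nil => intro acc d hd; simp at hd
  | cons x rest ih =>
    intro acc d hd hde hP
    simp only [mf, List.foldl_cons]
    rcases List.mem_cons.mp hd with h | h
    · subst h
      by_cases hax : acc < d
      · rw [if_pos ⟨hde, hax, hP⟩]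
        exact mf_le_acc e P rest d
      · have : d ≤ acc := by omega
        exact le_trans this (by split <;> [exact le_trans (by omega) (mf_le_acc e P rest _); exact mf_le_acc e P rest acc])
    · exact ih _ d h hde hP

theorem mf_cases (e : Int) (P : Int → Bool) :
    ∀ (xs : List Int) (acc : Int),
      mf e P xs acc = acc ∨ (mf e P xs acc ∈ xs ∧ mf e P xs acc ≤ e ∧ P (mf e P xs acc) = true) := by
  intro xs
  induction xs with
  | nil => intro acc; left; rfl
  | cons x rest ih =>
    intro acc
    simp only [mf, List.foldl_cons]
    split
    · rename_i hcond
      have hfold : List.foldl (fun best d => if d ≤ e ∧ best < d ∧ P d = true then d else best)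
          x rest = mf e P rest x := rfl
      rw [hfold]
      rcases ih x with h | ⟨h1, h2, h3⟩
      · right; exact ⟨by rw [h]; simp, by rw [h]; exact hcond.1, by rw [h]; exact hcond.2.2⟩
      · right; exact ⟨List.mem_cons_of_mem x h1, h2, h3⟩
    · have hfold : List.foldl (fun best d => if d ≤ e ∧ best < d ∧ P d = true then d else best)
          acc rest = mf e P rest acc := rfl
      rw [hfold]
      rcases ih acc with h | ⟨h1, h2, h3⟩
      · left; exact h
      · right; exact ⟨List.mem_cons_of_mem x h1, h2, h3⟩

theorem mem_candsOf (st : List Int) (c : Int) :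
    c ∈ candsOf st ↔ ∃ x, x ∈ st ∧ ∃ y, y ∈ st ∧ x < y ∧ y - x = c := by
  simp [candsOf, PySem.Set.mem_ofList, List.mem_flatMap, List.mem_filter, List.mem_map]
  constructor
  · rintro ⟨x, hx, y, ⟨hy, hxy⟩, hc⟩
    exact ⟨x, hx, y, hy, by simpa using hxy, hc⟩
  · rintro ⟨x, hx, y, hy, hxy, hc⟩
    exact ⟨x, hx, y, ⟨hy, by simpa using hxy⟩, hc⟩

theorem candsOf_pos (st : List Int) (c : Int) (h : c ∈ candsOf st) : 0 < c := by
  obtain ⟨x, _, y, _, hxy, hc⟩ := (mem_candsOf st c).mp h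
  omega

-- if no pairwise gap equals T, the greedy run cannot distinguish T from T+1
theorem canPlaceGo_congr (st : List Int) (k T : Int)
    (hnd : ∀ x ∈ st, ∀ y ∈ st, y - x ≠ T) :
    ∀ (idxs : List Int) (t l : Int), l ∈ st →
      (∀ i ∈ idxs, PySem.List.pyGetD st i 0 ∈ st) →
      canPlaceGo st k T idxs t l = canPlaceGo st k (T + 1) idxs t l := by
  intro idxs
  induction idxs with
  | nil => intro t l _ _; rfl
  | cons i rest ih =>
    intro t l hl hmem
    have hsi : PySem.List.pyGetD st i 0 ∈ st := hmem i (by simp)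
    have hne : PySem.List.pyGetD st i 0 - l ≠ T := hnd l hl _ hsi
    by_cases hc : T ≤ PySem.List.pyGetD st i 0 - l
    · have hc' : T + 1 ≤ PySem.List.pyGetD st i 0 - l := by omega
      simp only [canPlaceGo, if_pos hc, if_pos hc']
      split
      · rfl
      · exact ih (t + 1) _ hsi (fun j hj => hmem j (by simp [hj]))
    · have hc' : ¬ T + 1 ≤ PySem.List.pyGetD st i 0 - l := by omega
      simp only [canPlaceGo, if_neg hc, if_neg hc']
      split
      · rfl
      · exact ih t l hl (fun j hj => hmem j (by simp [hj]))

theorem canPlace_congr (st : List Int) (k T : Int) (hne : st ≠ [])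
    (hnd : ∀ x ∈ st, ∀ y ∈ st, y - x ≠ T) :
    canPlace st k T = canPlace st k (T + 1) := by
  unfold canPlace
  refine canPlaceGo_congr st k T hnd _ 1 _ ?_ ?_
  · cases st with
    | nil => exact absurd rfl hne
    | cons h tl => simp [PySem.List.pyGetD]
  · intro i hi
    obtain ⟨h1, h2⟩ := (PySem.List.mem_pyRange_one).mp hi
    have h0 : (0:Int) ≤ i := by omega
    rw [PySem.List.pyGetD_of_nonneg (h := h0)]
    have hlt : i.toNat < st.length := by omega
    rw [List.getD_eq_getElem st 0 hlt]
    exact List.getElem_mem hlt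

-- ===== VERDICT (by name: the statement is the Claim_ definition above) =====
theorem solve_spec : Claim_equal_solve := by
  intro n k stalls _hdom _hpre
  unfold Spec_solve solve solve_alt
  have hpw : (PySem.List.sorted stalls (fun x => x) false).Pairwise (· ≤ ·) :=
    PySem.List.sorted_pairwise stalls (fun x => x)
  cases hA : PySem.List.pyGet? (PySem.List.sorted stalls (fun x => x) false) (n - 1) with
  | none =>
    cases hB : PySem.List.pyGet? (PySem.List.sorted stalls (fun x => x) false) 0 <;>
      simp only [hA, hB]
  | some a =>
    cases hB : PySem.List.pyGet? (PySem.List.sorted stalls (fun x => x) false) 0 with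
    | none => simp only [hA, hB]
    | some b =>
      simp only [hA, hB]
      have hmono := canPlace_mono (PySem.List.sorted stalls (fun x => x) false) k hpw
      have hb0 : ∀ x ∈ (PySem.List.sorted stalls (fun x => x) false), b ≤ x := by
        cases hst : PySem.List.sorted stalls (fun x => x) false with
        | nil => rw [hst] at hB; simp [PySem.List.pyGet?_zero] at hB
        | cons h0 tl =>
          rw [hst] at hB hpw
          rw [PySem.List.pyGet?_zero] at hB
          simp at hB
          intro x hx
          rcases List.mem_cons.mp hx with h | h
          · omega
          · have := (List.pairwise_cons.mp hpw).1 x h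
            omega
      have ha : a ∈ (PySem.List.sorted stalls (fun x => x) false) :=
        PySem.List.mem_of_pyGet?_eq_some _ hA
      have he : (0:Int) ≤ a - b := by have := hb0 a ha; omega
      rw [bsLoop_eq_mxAux _ k hmono ((a - b) + 1).toNat 0 (a - b) 0 (by omega) (le_refl _)
        (by omega) rfl]
      have hnil : (PySem.List.sorted stalls (fun x => x) false) ≠ [] := by
        intro h
        rw [h] at hB
        simp [PySem.List.pyGet?] at hB
      have hb : b ∈ (PySem.List.sorted stalls (fun x => x) false) :=
        PySem.List.mem_of_pyGet?_eq_some _ hB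
      set st := PySem.List.sorted stalls (fun x => x) false with hst
      set P := canPlace st k with hP
      set T := mxAux P (a - b).toNat with hT
      show T = mf (a - b) P (candsOf st) 0
      set R := mf (a - b) P (candsOf st) 0 with hR
      have hcast : (((a - b).toNat : Nat) : Int) = a - b := by omega
      have hR0 : 0 ≤ R := mf_le_acc _ _ _ _
      have hRT : R ≤ T := by
        rcases mf_cases (a - b) P (candsOf st) 0 with h | ⟨h1, h2, h3⟩
        · rw [hR, h]; exact mxAux_nonneg _ _
        · exact le_mxAux P (a - b).toNat R (candsOf_pos st R h1) (by omega) h3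
      have hTR : T ≤ R := by
        by_cases hT0 : T ≤ 0
        · omega
        · have hPT : P T = true := mxAux_pos_spec P (a - b).toNat (by omega)
          have hTe : T ≤ a - b := by
            have := mxAux_le P (a - b).toNat
            omega
          have hmemT : T ∈ candsOf st := by
            by_contra hnc
            have hnd : ∀ x ∈ st, ∀ y ∈ st, y - x ≠ T := by
              intro x hx y hy hxy
              exact hnc ((mem_candsOf st T).mpr ⟨x, hx, y, hy, by omega, hxy⟩)
            rcases eq_or_lt_of_le hTe with hTeq | hTlt
            · exact hnd b hb a ha (by omega)
            · have hP1 : P (T + 1) = false := by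
                by_contra hP1t
                have : T + 1 ≤ T :=
                  le_mxAux P (a - b).toNat (T + 1) (by omega) (by omega)
                    (Bool.not_eq_false _ ▸ hP1t)
                omega
              have := canPlace_congr st k T hnil hnd
              rw [hP] at hPT hP1
              rw [this] at hPT
              rw [hPT] at hP1
              exact absurd hP1 (by simp)
          exact mf_ge_mem (a - b) P (candsOf st) 0 T hmemT hTe hPT
      omega
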